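-- pv_equiv track=rewrite | github.com/EnexaProject/enexa-tensor-reasoning | examples/binary_optimization/workload_to_qiskit.py | factorize_product
-- ===== SOURCE A (Python) =====
-- def factorize_product(positionDict):
--     if len(positionDict) == 0:
--         return [(1, [])]
--     var, value = positionDict.popitem()
--     sub_polynomial = factorize_product(positionDict)
--     if value == 1:
--         return [(weight, facList + [var]) for weight, facList in sub_polynomial]
--     elif value == 0:
--         return sub_polynomial + [(-1 * weight, facList + [var]) for weight, facList in sub_polynomial]
--     else:
--         raise ValueError("Value {} not supported in binary interpretation!".format(value))
-- ===== SOURCE B (Python) =====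
-- def factorize_product(positionDict):
--     items = []
--     while positionDict:
--         items.append(positionDict.popitem())
--     poly = [(1, [])]
--     for var, value in reversed(items):
--         if value == 1:
--             poly = [(w, fl + [var]) for w, fl in poly]
--         elif value == 0:
--             poly = poly + [(-w, fl + [var]) for w, fl in poly]
--         else:
--             raise ValueError("Value {} not supported in binary interpretation!".format(value))
--     return poly
-- ===== Notes on version B (the rewrite author's own statement) =====
-- stated objective: alternative
-- what changed: B drains the dict once into a list and builds the polynomial with an iterative left-to-right fold over an accumulator, instead of A's recursion that rebuilds the term list on each ascent.
import Mathlib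
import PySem

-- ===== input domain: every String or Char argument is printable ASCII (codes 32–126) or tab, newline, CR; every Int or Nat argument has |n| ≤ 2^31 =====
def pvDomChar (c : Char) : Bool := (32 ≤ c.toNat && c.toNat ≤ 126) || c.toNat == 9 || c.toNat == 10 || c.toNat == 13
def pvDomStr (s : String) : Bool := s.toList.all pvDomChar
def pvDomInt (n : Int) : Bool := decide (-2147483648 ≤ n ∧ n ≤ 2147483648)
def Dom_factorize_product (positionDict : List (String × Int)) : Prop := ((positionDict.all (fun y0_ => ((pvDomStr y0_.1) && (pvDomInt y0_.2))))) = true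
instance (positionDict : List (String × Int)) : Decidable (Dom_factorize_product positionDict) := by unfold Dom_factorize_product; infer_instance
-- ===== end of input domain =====

-- B replaces A's pop-and-recurse construction with a single iterative fold over the items
-- in insertion order (same values everywhere A returns; both raise on values other than 0/1,
-- excluded by Pre_). Note: A (and B) empty the positionDict argument in place; the claim is
-- about the return value only.


-- ===== PORT A =====
-- Literal port of A: popitem() takes the LAST entry of the dict (LIFO), the recursion runs
-- on the remaining prefix; the 'raise' branch is outside Pre_ and ported as [].
def factorize_product (positionDict : List (String × Int)) : List (Int × List String) :=
  if h : positionDict.isEmpty then [(1, [])]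
  else
    let vv := positionDict.getLast (by simpa [List.isEmpty_iff] using h)
    let sub_polynomial := factorize_product positionDict.dropLast
    if vv.2 = 1 then
      sub_polynomial.map (fun wf => (wf.1, wf.2 ++ [vv.1]))
    else if vv.2 = 0 then
      sub_polynomial ++ sub_polynomial.map (fun wf => (-1 * wf.1, wf.2 ++ [vv.1]))
    else []  -- Python raises ValueError here; excluded by Pre_
termination_by positionDict.length
decreasing_by
  have hne : positionDict ≠ [] := by simpa [List.isEmpty_iff] using h
  have hpos : 0 < positionDict.length := List.length_pos_of_ne_nil hne
  simp [List.length_dropLast]; omega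

-- ===== PORT B =====
-- Port of B: drain into a list (popitem LIFO, then reversed = insertion order) and fold.
def fp_step (poly : List (Int × List String)) (item : String × Int) : List (Int × List String) :=
  if item.2 = 1 then poly.map (fun wf => (wf.1, wf.2 ++ [item.1]))
  else if item.2 = 0 then poly ++ poly.map (fun wf => (-wf.1, wf.2 ++ [item.1]))
  else []  -- Python raises ValueError here; excluded by Pre_

def factorize_product_alt (positionDict : List (String × Int)) : List (Int × List String) :=
  ((positionDict.reverse).reverse).foldl fp_step [(1, [])]

-- ===== PRECONDITION & SPEC =====
-- Pre_ excludes exactly the inputs on which Python A raises ValueError: some value other than 0 or 1.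
def Pre_factorize_product (positionDict : List (String × Int)) : Prop :=
  ∀ p ∈ positionDict, p.2 = 0 ∨ p.2 = 1
instance (positionDict : List (String × Int)) : Decidable (Pre_factorize_product positionDict) := by unfold Pre_factorize_product; infer_instance
def pvWitness_factorize_product : (List (String × Int)) := [("x", 1), ("y", 0)]

def Spec_factorize_product (positionDict : List (String × Int)) (out : List (Int × List String)) : Prop := out = factorize_product_alt positionDict
instance (positionDict : List (String × Int)) (out : List (Int × List String)) : Decidable (Spec_factorize_product positionDict out) := by unfold Spec_factorize_product; infer_instance

-- ===== CLAIM (what is proved, stated in full; the proofs are below) =====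
def Claim_equal_factorize_product : Prop := ∀ (positionDict : List (String × Int)), Dom_factorize_product positionDict → Pre_factorize_product positionDict → Spec_factorize_product positionDict (factorize_product positionDict)

-- ===== LEMMAS AND PROOFS =====

lemma factorize_product_eq_foldl (pd : List (String × Int)) :
    factorize_product pd = pd.foldl fp_step [(1, [])] := by
  induction pd using List.reverseRecOn with
  | nil => rw [factorize_product.eq_def]; simp
  | append_singleton xs x ih =>
    rw [factorize_product.eq_def]
    simp only [List.isEmpty_iff, List.append_ne_nil_of_right_ne_nil xs (by simp : [x] ≠ []),
      dite_false, List.getLast_append_singleton, List.dropLast_concat, List.foldl_append,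
      List.foldl_cons, List.foldl_nil, ih]
    unfold fp_step
    split_ifs <;> simp

-- ===== VERDICT (by name: the statement is the Claim_ definition above) =====
theorem factorize_product_spec : Claim_equal_factorize_product := by
  intro pd _ _
  unfold Spec_factorize_product factorize_product_alt
  rw [List.reverse_reverse]
  exact factorize_product_eq_foldl pd
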